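-- pv_equiv track=rewrite | github.com/humanbound/humanbound-firewall | src/humanbound_firewall/hbfw.py | _extract_qa_turns_from_logs
-- ===== SOURCE A (Python) =====
-- def _extract_qa_turns_from_logs(logs):
--     """Extract individual turns from QA logs with context."""
--     texts = []
--     for log in logs:
--         conv = log.get("conversation", [])
--         for i, turn in enumerate(conv):
--             user_msg = turn.get("u") or turn.get("user") or ""
--             if not user_msg.strip() or len(user_msg.strip()) < 10:
--                 continue
--             ctx_start = max(0, i - 2)
--             parts = []
--             for j in range(ctx_start, i + 1):
--                 t = conv[j]
--                 a = t.get("a") or t.get("assistant") or ""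
--                 u = t.get("u") or t.get("user") or ""
--                 if a:
--                     parts.append(f"Agent: {a}")
--                 if u:
--                     parts.append(f"User: {u}")
--             texts.append("\n".join(parts))
--     return texts
-- ===== SOURCE B (Python) =====
-- def _extract_qa_turns_from_logs(logs):
--     texts = []
--     for log in logs:
--         window = []  # formatted fragments of the last <= 3 turns seen, newest last
--         for turn in log.get("conversation", []):
--             a = turn.get("a") or turn.get("assistant") or ""
--             u = turn.get("u") or turn.get("user") or ""
--             frag = ([f"Agent: {a}"] if a else []) + ([f"User: {u}"] if u else [])
--             window = (window + [frag])[-3:]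
--             if len(u.strip()) >= 10:
--                 texts.append("\n".join(line for fr in window for line in fr))
--     return texts
-- ===== Notes on version B (the rewrite author's own statement) =====
-- stated objective: alternative
-- what changed: B is a single streaming pass with a bounded sliding-window accumulator: it keeps only the formatted fragments of the last three turns seen and emits the joined window when the current turn qualifies, with no indices, no enumerate, and no per-anchor re-extraction of context turns by index as in A.
import Mathlib
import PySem

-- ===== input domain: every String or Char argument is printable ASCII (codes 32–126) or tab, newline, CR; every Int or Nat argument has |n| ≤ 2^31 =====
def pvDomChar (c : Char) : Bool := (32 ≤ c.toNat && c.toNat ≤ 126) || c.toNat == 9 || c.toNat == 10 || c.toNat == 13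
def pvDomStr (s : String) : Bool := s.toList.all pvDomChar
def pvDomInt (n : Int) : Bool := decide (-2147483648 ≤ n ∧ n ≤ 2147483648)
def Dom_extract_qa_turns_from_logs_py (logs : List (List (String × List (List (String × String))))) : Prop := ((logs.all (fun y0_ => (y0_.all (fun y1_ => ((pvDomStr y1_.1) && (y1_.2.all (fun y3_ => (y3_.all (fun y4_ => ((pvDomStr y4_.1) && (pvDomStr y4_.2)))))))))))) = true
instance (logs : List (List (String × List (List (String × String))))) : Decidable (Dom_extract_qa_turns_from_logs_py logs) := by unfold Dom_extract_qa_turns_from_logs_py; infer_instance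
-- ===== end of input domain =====

-- B replaces A's indexed window re-extraction (range(max(0,i-2), i+1) with conv[j] lookups per
-- anchor) by a single streaming pass that maintains the formatted fragments of the last ≤3 turns
-- as a bounded sliding-window accumulator (objective: alternative).

-- ===== PORT A =====
-- literal transliteration of _extract_qa_turns_from_logs
def extract_qa_turns_from_logs_py (logs : List (List (String × List (List (String × String))))) : List String :=
  logs.foldl (fun texts log =>
    let conv := (PySem.Dict.mk log).getD "conversation" []
    (PySem.List.enumerate conv).foldl (fun texts it =>
      let i := it.1
      let turn := it.2
      -- user_msg = turn.get("u") or turn.get("user") or ""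
      let um := (PySem.Dict.mk turn).getD "u" ""
      let user_msg := if um = "" then (PySem.Dict.mk turn).getD "user" "" else um
      if PySem.Str.strip user_msg = "" ∨ PySem.Str.len (PySem.Str.strip user_msg) < 10 then
        texts
      else
        let ctx_start := max 0 (i - 2)
        let parts := (PySem.List.pyRange ctx_start (i + 1)).foldl (fun parts j =>
          -- conv[j] is always in range here; pyGetD's default is never used
          let t := PySem.List.pyGetD conv j []
          let a0 := (PySem.Dict.mk t).getD "a" ""
          let a := if a0 = "" then (PySem.Dict.mk t).getD "assistant" "" else a0
          let u0 := (PySem.Dict.mk t).getD "u" ""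
          let u := if u0 = "" then (PySem.Dict.mk t).getD "user" "" else u0
          let parts1 := if a ≠ "" then parts ++ ["Agent: " ++ a] else parts
          if u ≠ "" then parts1 ++ ["User: " ++ u] else parts1) []
        texts ++ [PySem.Str.join "\n" parts]) texts) []

-- ===== PORT B =====
-- literal transliteration of B: one pass, state = (texts, window of the last ≤3 fragment lists)
def extract_qa_turns_from_logs_py_alt (logs : List (List (String × List (List (String × String))))) : List String :=
  logs.foldl (fun texts log =>
    let conv := (PySem.Dict.mk log).getD "conversation" []
    (conv.foldl (fun st turn =>
      let a0 := (PySem.Dict.mk turn).getD "a" ""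
      let a := if a0 = "" then (PySem.Dict.mk turn).getD "assistant" "" else a0
      let u0 := (PySem.Dict.mk turn).getD "u" ""
      let u := if u0 = "" then (PySem.Dict.mk turn).getD "user" "" else u0
      let frag := (if a ≠ "" then ["Agent: " ++ a] else []) ++ (if u ≠ "" then ["User: " ++ u] else [])
      -- window = (window + [frag])[-3:]
      let window := PySem.List.slice (st.2 ++ [frag]) (some (-3)) none
      if 10 ≤ PySem.Str.len (PySem.Str.strip u) then
        (st.1 ++ [PySem.Str.join "\n" window.flatten], window)
      else (st.1, window)) ((texts, []) : List String × List (List String))).1) []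

-- ===== PRECONDITION & SPEC =====
def Spec_extract_qa_turns_from_logs_py (logs : List (List (String × List (List (String × String))))) (out : List String) : Prop := out = extract_qa_turns_from_logs_py_alt logs
instance (logs : List (List (String × List (List (String × String))))) (out : List String) : Decidable (Spec_extract_qa_turns_from_logs_py logs out) := by unfold Spec_extract_qa_turns_from_logs_py; infer_instance

-- ===== CLAIM (what is proved, stated in full; the proofs are below) =====
def Claim_equal_extract_qa_turns_from_logs_py : Prop := ∀ (logs : List (List (String × List (List (String × String))))), Dom_extract_qa_turns_from_logs_py logs → Spec_extract_qa_turns_from_logs_py logs (extract_qa_turns_from_logs_py logs)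

-- ===== LEMMAS AND PROOFS =====

-- the turn's user message (after the or-chain) and its formatted fragment list
def pvU (t : List (String × String)) : String :=
  let u0 := (PySem.Dict.mk t).getD "u" ""
  if u0 = "" then (PySem.Dict.mk t).getD "user" "" else u0

def pvFrag (t : List (String × String)) : List String :=
  let a0 := (PySem.Dict.mk t).getD "a" ""
  let a := if a0 = "" then (PySem.Dict.mk t).getD "assistant" "" else a0
  (if a ≠ "" then ["Agent: " ++ a] else []) ++ (if pvU t ≠ "" then ["User: " ++ pvU t] else [])

-- B's window state after m turns of conv have been consumed
def pvWin (conv : List (List (String × String))) (m : Nat) : List (List String) :=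
  ((conv.map pvFrag).take m).drop (m - 3)

-- A's skip test (empty strip OR stripped length < 10) is the negation of B's keep test
theorem pv_cond_iff (s : String) :
    (s = "" ∨ PySem.Str.len s < 10) ↔ ¬ (10 ≤ PySem.Str.len s) := by
  rw [PySem.Str.len_eq]
  constructor
  · rintro (rfl | h)
    · simp
    · omega
  · intro h; right; omega

-- A's two conditional appends add exactly the turn's fragment list
theorem pv_stepA_eq (conv : List (List (String × String))) (parts : List String) (j : Int) :
    (let t := PySem.List.pyGetD conv j []
     let a0 := (PySem.Dict.mk t).getD "a" ""
     let a := if a0 = "" then (PySem.Dict.mk t).getD "assistant" "" else a0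
     let u0 := (PySem.Dict.mk t).getD "u" ""
     let u := if u0 = "" then (PySem.Dict.mk t).getD "user" "" else u0
     let parts1 := if a ≠ "" then parts ++ ["Agent: " ++ a] else parts
     if u ≠ "" then parts1 ++ ["User: " ++ u] else parts1)
      = parts ++ pvFrag (PySem.List.pyGetD conv j []) := by
  simp only [pvFrag, pvU]
  split_ifs <;> simp_all

-- [xs[j] for j in range(a,b)] is xs[a:b] when 0 ≤ a ≤ b ≤ len(xs)
theorem pv_map_pyGetD_range (xs : List (List (String × String))) (a b : Nat)
    (hab : a ≤ b) (hb : b ≤ xs.length) :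
    (PySem.List.pyRange (a : Int) (b : Int)).map (fun j => PySem.List.pyGetD xs j []) =
      (xs.drop a).take (b - a) := by
  have hall := PySem.List.map_pyGetD_pyRange xs ([] : List (String × String))
    (a := (a : Int)) (Int.natCast_nonneg a)
  have hrest := PySem.List.map_pyGetD_pyRange xs ([] : List (String × String))
    (a := (b : Int)) (Int.natCast_nonneg b)
  have hlenxs : PySem.List.len xs = (xs.length : Int) := by simp [PySem.List.len]
  rw [hlenxs, Int.toNat_natCast] at hall hrest
  have hsplit := PySem.List.pyRange_one_append (a : Int) (b : Int) (xs.length : Int)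
    (by exact_mod_cast hab) (by exact_mod_cast hb)
  rw [hsplit, List.map_append, hrest] at hall
  have hlen : ((PySem.List.pyRange (a : Int) (b : Int)).map
      (fun j => PySem.List.pyGetD xs j [])).length = b - a := by
    simp only [List.length_map, PySem.List.length_pyRange_one]
    omega
  calc (PySem.List.pyRange (a : Int) (b : Int)).map (fun j => PySem.List.pyGetD xs j [])
      = (((PySem.List.pyRange (a : Int) (b : Int)).map (fun j => PySem.List.pyGetD xs j []))
          ++ xs.drop b).take ((PySem.List.pyRange (a : Int) (b : Int)).map
            (fun j => PySem.List.pyGetD xs j [])).length := List.take_left.symm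
    _ = (xs.drop a).take (b - a) := by rw [hall, hlen]

-- pushing the next fragment and keeping the last 3 advances B's window state
theorem pv_win_step (conv : List (List (String × String))) (k : Nat) (hk : k < conv.length)
    (t : List (String × String)) (ht : conv[k]? = some t) :
    PySem.List.slice (pvWin conv k ++ [pvFrag t]) (some (-3)) none = pvWin conv (k + 1) := by
  have hkF : k < (conv.map pvFrag).length := by simpa using hk
  have htF : (conv.map pvFrag)[k]? = some (pvFrag t) := by
    simp [List.getElem?_map, ht]
  have h1 : (conv.map pvFrag).take (k + 1) = (conv.map pvFrag).take k ++ [pvFrag t] := by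
    rw [List.take_add_one, htF]; rfl
  have h2 : pvWin conv k ++ [pvFrag t] = ((conv.map pvFrag).take (k + 1)).drop (k - 3) := by
    rw [h1, List.drop_append_of_le_length (by simp; omega)]; rfl
  have hlen : (pvWin conv k ++ [pvFrag t]).length = (k + 1) - (k - 3) := by
    rw [h2]; simp; omega
  rw [PySem.List.slice_from_neg_ofNat _ 3 (by omega), hlen, h2, List.drop_drop]
  unfold pvWin
  congr 1
  omega

-- A's per-anchor window loop computes the flattening of B's window state after the anchor
theorem pv_content (conv : List (List (String × String))) (k : Nat) (hk : k < conv.length) :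
    (PySem.List.pyRange ((k - 2 : Nat) : Int) ((k : Int) + 1)).foldl (fun parts j =>
        let t := PySem.List.pyGetD conv j []
        let a0 := (PySem.Dict.mk t).getD "a" ""
        let a := if a0 = "" then (PySem.Dict.mk t).getD "assistant" "" else a0
        let u0 := (PySem.Dict.mk t).getD "u" ""
        let u := if u0 = "" then (PySem.Dict.mk t).getD "user" "" else u0
        let parts1 := if a ≠ "" then parts ++ ["Agent: " ++ a] else parts
        if u ≠ "" then parts1 ++ ["User: " ++ u] else parts1) []
      = (pvWin conv (k + 1)).flatten := by
  have hfun : (fun (parts : List String) (j : Int) =>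
      let t := PySem.List.pyGetD conv j []
      let a0 := (PySem.Dict.mk t).getD "a" ""
      let a := if a0 = "" then (PySem.Dict.mk t).getD "assistant" "" else a0
      let u0 := (PySem.Dict.mk t).getD "u" ""
      let u := if u0 = "" then (PySem.Dict.mk t).getD "user" "" else u0
      let parts1 := if a ≠ "" then parts ++ ["Agent: " ++ a] else parts
      if u ≠ "" then parts1 ++ ["User: " ++ u] else parts1)
      = fun parts j => parts ++ pvFrag (PySem.List.pyGetD conv j []) :=
    funext fun parts => funext fun j => pv_stepA_eq conv parts j
  rw [hfun, PySem.List.foldl_append_eq_flatMap]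
  have h1 : ((k : Int) + 1) = ((k + 1 : Nat) : Int) := by push_cast; ring
  have hcomp : (PySem.List.pyRange ((k - 2 : Nat) : Int) ((k + 1 : Nat) : Int)).flatMap
      (fun j => pvFrag (PySem.List.pyGetD conv j []))
      = ((PySem.List.pyRange ((k - 2 : Nat) : Int) ((k + 1 : Nat) : Int)).map
          (fun j => PySem.List.pyGetD conv j [])).flatMap pvFrag := by
    rw [List.flatMap_map]
  rw [h1, hcomp, pv_map_pyGetD_range conv (k - 2) (k + 1) (by omega) (by omega)]
  unfold pvWin
  rw [← List.map_take, ← List.map_drop, show k + 1 - 3 = k - 2 from by omega,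
    List.drop_take, ← List.flatMap_def, List.nil_append]

-- one turn: B's step from (texts, window-at-k) is (A's step from texts, window-at-(k+1))
theorem pv_turn_eq (conv : List (List (String × String))) (k : Nat) (hk : k < conv.length)
    (t : List (String × String)) (ht : conv[k]? = some t) (texts : List String) :
    ((fun (st : List String × List (List String)) turn =>
      let a0 := (PySem.Dict.mk turn).getD "a" ""
      let a := if a0 = "" then (PySem.Dict.mk turn).getD "assistant" "" else a0
      let u0 := (PySem.Dict.mk turn).getD "u" ""
      let u := if u0 = "" then (PySem.Dict.mk turn).getD "user" "" else u0
      let frag := (if a ≠ "" then ["Agent: " ++ a] else []) ++ (if u ≠ "" then ["User: " ++ u] else [])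
      let window := PySem.List.slice (st.2 ++ [frag]) (some (-3)) none
      if 10 ≤ PySem.Str.len (PySem.Str.strip u) then
        (st.1 ++ [PySem.Str.join "\n" window.flatten], window)
      else (st.1, window)) (texts, pvWin conv k) t)
    = ((let um := (PySem.Dict.mk t).getD "u" ""
        let user_msg := if um = "" then (PySem.Dict.mk t).getD "user" "" else um
        if PySem.Str.strip user_msg = "" ∨ PySem.Str.len (PySem.Str.strip user_msg) < 10 then
          texts
        else
          let ctx_start := max 0 ((k : Int) - 2)
          let parts := (PySem.List.pyRange ctx_start ((k : Int) + 1)).foldl (fun parts j =>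
            let t := PySem.List.pyGetD conv j []
            let a0 := (PySem.Dict.mk t).getD "a" ""
            let a := if a0 = "" then (PySem.Dict.mk t).getD "assistant" "" else a0
            let u0 := (PySem.Dict.mk t).getD "u" ""
            let u := if u0 = "" then (PySem.Dict.mk t).getD "user" "" else u0
            let parts1 := if a ≠ "" then parts ++ ["Agent: " ++ a] else parts
            if u ≠ "" then parts1 ++ ["User: " ++ u] else parts1) []
          texts ++ [PySem.Str.join "\n" parts]), pvWin conv (k + 1)) := by
  have hfrag : ((if (if (PySem.Dict.mk t).getD "a" "" = "" then (PySem.Dict.mk t).getD "assistant" ""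
        else (PySem.Dict.mk t).getD "a" "") ≠ "" then
          ["Agent: " ++ (if (PySem.Dict.mk t).getD "a" "" = "" then (PySem.Dict.mk t).getD "assistant" ""
            else (PySem.Dict.mk t).getD "a" "")] else []) ++
      (if (if (PySem.Dict.mk t).getD "u" "" = "" then (PySem.Dict.mk t).getD "user" ""
        else (PySem.Dict.mk t).getD "u" "") ≠ "" then
          ["User: " ++ (if (PySem.Dict.mk t).getD "u" "" = "" then (PySem.Dict.mk t).getD "user" ""
            else (PySem.Dict.mk t).getD "u" "")] else [])) = pvFrag t := rfl
  simp only []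
  rw [hfrag, pv_win_step conv k hk t ht]
  have hmax : max 0 ((k : Int) - 2) = ((k - 2 : Nat) : Int) := by omega
  rw [hmax]
  have hcont := pv_content conv k hk
  simp only [] at hcont
  rw [hcont]
  by_cases hkeep : 10 ≤ PySem.Str.len (PySem.Str.strip
    (if (PySem.Dict.mk t).getD "u" "" = "" then (PySem.Dict.mk t).getD "user" ""
     else (PySem.Dict.mk t).getD "u" ""))
  · rw [if_pos hkeep, if_neg (fun h => (pv_cond_iff _).mp h hkeep)]
  · rw [if_neg hkeep, if_pos ((pv_cond_iff _).mpr hkeep)]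

-- main loop invariant: A's enumerate-fold from k equals B's window-fold from window-at-k
set_option maxHeartbeats 1600000 in
theorem pv_inner_eq (conv : List (List (String × String))) :
    ∀ (rest : List (List (String × String))) (k : Nat), rest = conv.drop k →
      ∀ (texts : List String),
      (PySem.List.enumerate rest (k : Int)).foldl (fun texts it =>
        let i := it.1
        let turn := it.2
        let um := (PySem.Dict.mk turn).getD "u" ""
        let user_msg := if um = "" then (PySem.Dict.mk turn).getD "user" "" else um
        if PySem.Str.strip user_msg = "" ∨ PySem.Str.len (PySem.Str.strip user_msg) < 10 then
          texts
        else
          let ctx_start := max 0 (i - 2)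
          let parts := (PySem.List.pyRange ctx_start (i + 1)).foldl (fun parts j =>
            let t := PySem.List.pyGetD conv j []
            let a0 := (PySem.Dict.mk t).getD "a" ""
            let a := if a0 = "" then (PySem.Dict.mk t).getD "assistant" "" else a0
            let u0 := (PySem.Dict.mk t).getD "u" ""
            let u := if u0 = "" then (PySem.Dict.mk t).getD "user" "" else u0
            let parts1 := if a ≠ "" then parts ++ ["Agent: " ++ a] else parts
            if u ≠ "" then parts1 ++ ["User: " ++ u] else parts1) []
          texts ++ [PySem.Str.join "\n" parts]) texts
      = (rest.foldl (fun (st : List String × List (List String)) turn =>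
          let a0 := (PySem.Dict.mk turn).getD "a" ""
          let a := if a0 = "" then (PySem.Dict.mk turn).getD "assistant" "" else a0
          let u0 := (PySem.Dict.mk turn).getD "u" ""
          let u := if u0 = "" then (PySem.Dict.mk turn).getD "user" "" else u0
          let frag := (if a ≠ "" then ["Agent: " ++ a] else []) ++ (if u ≠ "" then ["User: " ++ u] else [])
          let window := PySem.List.slice (st.2 ++ [frag]) (some (-3)) none
          if 10 ≤ PySem.Str.len (PySem.Str.strip u) then
            (st.1 ++ [PySem.Str.join "\n" window.flatten], window)
          else (st.1, window)) (texts, pvWin conv k)).1 := by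
  intro rest
  induction rest with
  | nil => intro k _ texts; simp [PySem.List.enumerate_nil]
  | cons t rest' ih =>
    intro k hk texts
    have ht : conv[k]? = some t := by
      have h0 : (conv.drop k)[0]? = some t := by rw [← hk]; rfl
      simpa using h0
    have hklen : k < conv.length := (List.getElem?_eq_some_iff.mp ht).1
    have hrest' : rest' = conv.drop (k + 1) := by
      have h1 := congrArg List.tail hk
      simpa [List.tail_drop] using h1
    rw [PySem.List.enumerate_cons, List.foldl_cons, List.foldl_cons]
    have hstep := pv_turn_eq conv k hklen t ht texts
    have hcast : (k : Int) + 1 = ((k + 1 : Nat) : Int) := by push_cast; ring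
    simp only [] at hstep ih ⊢
    rw [hstep, hcast, ih (k + 1) hrest']

-- ===== VERDICT (by name: the statement is the Claim_ definition above) =====
set_option maxHeartbeats 1000000 in
theorem extract_qa_turns_from_logs_py_spec : Claim_equal_extract_qa_turns_from_logs_py := by
  intro logs _
  unfold Spec_extract_qa_turns_from_logs_py extract_qa_turns_from_logs_py
    extract_qa_turns_from_logs_py_alt
  apply List.foldl_ext
  intro texts log _
  have h := pv_inner_eq ((PySem.Dict.mk log).getD "conversation" [])
    ((PySem.Dict.mk log).getD "conversation" []) 0 rfl texts
  simpa [pvWin] using h
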